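-- pv_equiv track=rewrite | github.com/ipa-vsp/ros2_communication_test | scripts/qos_matrix_common.py | worst_status
-- ===== SOURCE A (Python) =====
-- from typing import Dict, Iterable, List
--
-- def worst_status(statuses: Iterable[str]) -> str:
--     severity = {"pass": 0, "caution": 1, "failed": 2}
--     score = 0
--     result = "pass"
--     for status in statuses:
--         normalized = status.lower()
--         if normalized not in severity:
--             raise ValueError(f"Unknown status '{status}'")
--         if severity[normalized] >= score:
--             score = severity[normalized]
--             result = normalized
--     return result
-- ===== SOURCE B (Python) =====
-- def worst_status(statuses):
--     known = {"pass", "caution", "failed"}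
--     seen = set()
--     for status in statuses:
--         normalized = status.lower()
--         if normalized not in known:
--             raise ValueError(f"Unknown status '{status}'")
--         seen.add(normalized)
--     if "failed" in seen:
--         return "failed"
--     if "caution" in seen:
--         return "caution"
--     return "pass"
-- ===== Notes on version B (the rewrite author's own statement) =====
-- stated objective: idiomatic
-- what changed: Replaces the numeric running-max reduction (score/result state updated per element) by a validate-and-collect pass into a set followed by an ordered priority membership check.
import Mathlib
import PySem

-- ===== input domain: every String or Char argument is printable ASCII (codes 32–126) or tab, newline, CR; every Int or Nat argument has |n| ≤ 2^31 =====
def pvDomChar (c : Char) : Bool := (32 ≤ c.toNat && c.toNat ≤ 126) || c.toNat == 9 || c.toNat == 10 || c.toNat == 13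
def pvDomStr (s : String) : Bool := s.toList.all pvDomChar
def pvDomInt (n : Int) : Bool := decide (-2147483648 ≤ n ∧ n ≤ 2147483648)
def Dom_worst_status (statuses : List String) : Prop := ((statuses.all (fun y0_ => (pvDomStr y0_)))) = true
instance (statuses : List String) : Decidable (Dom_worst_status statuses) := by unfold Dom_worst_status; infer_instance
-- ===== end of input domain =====

-- B replaces A's numeric running-max reduction by a validate-and-collect pass into a set
-- followed by an ordered priority membership check (idiomatic; same cost).


-- ===== PORT A =====
def pvSeverity : PySem.Dict String Int :=
  PySem.Dict.ofList [("pass", 0), ("caution", 1), ("failed", 2)]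

def worst_status_go : List String → Int → String → String
  | [], _, result => result
  | status :: rest, score, result =>
    let normalized := PySem.Str.lower status
    match PySem.Dict.get? pvSeverity normalized with
    | none => "ValueError"  -- A raises ValueError here; such inputs are excluded by Pre_
    | some sev =>
      if sev ≥ score then worst_status_go rest sev normalized
      else worst_status_go rest score result

def worst_status (statuses : List String) : String :=
  worst_status_go statuses 0 "pass"

-- ===== PORT B =====
def pvKnown : PySem.Set String := PySem.Set.ofList ["pass", "caution", "failed"]

def worst_status_alt_go : List String → PySem.Set String → Option (PySem.Set String)
  | [], seen => some seen
  | status :: rest, seen =>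
    let normalized := PySem.Str.lower status
    if PySem.Set.contains pvKnown normalized then
      worst_status_alt_go rest (PySem.Set.add seen normalized)
    else none  -- B raises ValueError here; such inputs are excluded by Pre_

def worst_status_alt (statuses : List String) : String :=
  match worst_status_alt_go statuses PySem.Set.empty with
  | none => "ValueError"
  | some seen =>
    if PySem.Set.contains seen "failed" then "failed"
    else if PySem.Set.contains seen "caution" then "caution"
    else "pass"

-- ===== PRECONDITION & SPEC =====
-- Pre_ excludes exactly the inputs containing a status whose lower() is not a known
-- status: there A (and B) raise ValueError.
def Pre_worst_status (statuses : List String) : Prop :=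
  ∀ s ∈ statuses, PySem.Str.lower s ∈ (["pass", "caution", "failed"] : List String)
instance (statuses : List String) : Decidable (Pre_worst_status statuses) := by
  unfold Pre_worst_status; infer_instance

def pvWitness_worst_status : List String := ["Pass", "FAILED", "caution"]

def Spec_worst_status (statuses : List String) (out : String) : Prop := out = worst_status_alt statuses
instance (statuses : List String) (out : String) : Decidable (Spec_worst_status statuses out) := by unfold Spec_worst_status; infer_instance

-- ===== CLAIM (what is proved, stated in full; the proofs are below) =====
def Claim_equal_worst_status : Prop := ∀ (statuses : List String), Dom_worst_status statuses → Pre_worst_status statuses → Spec_worst_status statuses (worst_status statuses)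

-- ===== LEMMAS AND PROOFS =====

-- the score / result that A's loop state holds, expressed from B's `seen` set
def pvRefScore (seen : List String) : Int :=
  if "failed" ∈ seen then 2 else if "caution" ∈ seen then 1 else 0
def pvRefRes (seen : List String) : String :=
  if "failed" ∈ seen then "failed" else if "caution" ∈ seen then "caution" else "pass"

lemma pv_go_eq : ∀ (rest : List String) (seen : PySem.Set String),
    (∀ s ∈ rest, PySem.Str.lower s ∈ (["pass", "caution", "failed"] : List String)) →
    ∃ seen', worst_status_alt_go rest seen = some seen' ∧
      worst_status_go rest (pvRefScore seen) (pvRefRes seen) = pvRefRes seen' := by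
  intro rest
  induction rest with
  | nil => intro seen _; exact ⟨seen, rfl, rfl⟩
  | cons status rest ih =>
    intro seen hpre
    have hs : PySem.Str.lower status ∈ (["pass", "caution", "failed"] : List String) :=
      hpre status (List.mem_cons_self)
    have hrest : ∀ s ∈ rest, PySem.Str.lower s ∈ (["pass", "caution", "failed"] : List String) :=
      fun s hm => hpre s (List.mem_cons_of_mem _ hm)
    simp only [List.mem_cons, List.not_mem_nil, or_false] at hs
    rcases hs with hn | hn | hn
    · -- "pass"
      obtain ⟨seen', h1, h2⟩ := ih (PySem.Set.add seen "pass") hrest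
      refine ⟨seen', ?_, ?_⟩
      · simp [worst_status_alt_go, hn]
        exact ⟨by decide, h1⟩
      · simp only [worst_status_go, hn,
          show PySem.Dict.get? pvSeverity "pass" = some 0 from by decide]
        by_cases hF : "failed" ∈ seen <;> by_cases hC : "caution" ∈ seen <;>
          simp_all [pvRefScore, pvRefRes]
    · -- "caution"
      obtain ⟨seen', h1, h2⟩ := ih (PySem.Set.add seen "caution") hrest
      refine ⟨seen', ?_, ?_⟩
      · simp [worst_status_alt_go, hn]
        exact ⟨by decide, h1⟩
      · simp only [worst_status_go, hn,
          show PySem.Dict.get? pvSeverity "caution" = some 1 from by decide]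
        by_cases hF : "failed" ∈ seen <;> by_cases hC : "caution" ∈ seen <;>
          simp_all [pvRefScore, pvRefRes]
    · -- "failed"
      obtain ⟨seen', h1, h2⟩ := ih (PySem.Set.add seen "failed") hrest
      refine ⟨seen', ?_, ?_⟩
      · simp [worst_status_alt_go, hn]
        exact ⟨by decide, h1⟩
      · simp only [worst_status_go, hn,
          show PySem.Dict.get? pvSeverity "failed" = some 2 from by decide]
        by_cases hF : "failed" ∈ seen <;> by_cases hC : "caution" ∈ seen <;>
          simp_all [pvRefScore, pvRefRes]

theorem worst_status_spec : Claim_equal_worst_status := by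
  intro statuses _ hpre
  unfold Spec_worst_status worst_status worst_status_alt
  obtain ⟨seen', h1, h2⟩ := pv_go_eq statuses PySem.Set.empty hpre
  rw [h1]
  have h2' : worst_status_go statuses 0 "pass" = pvRefRes seen' := h2
  rw [h2']
  simp [pvRefRes]
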